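-- pv_equiv track=rewrite | github.com/rouge1/light-cam-canto | protocol/frame.py | symbols_to_hex
-- ===== SOURCE A (Python) =====
-- def symbols_to_hex(symbols: list[int]) -> str:
--     """Pack symbols (0/1) MSB-first into hex bytes. Pads trailing bits with 0."""
--     out = []
--     for i in range(0, len(symbols), 8):
--         chunk = symbols[i:i + 8]
--         if len(chunk) < 8:
--             chunk = chunk + [0] * (8 - len(chunk))
--         byte = 0
--         for s in chunk:
--             byte = (byte << 1) | (s & 1)
--         out.append(f"{byte:02x}")
--     return "".join(out)
-- ===== SOURCE B (Python) =====
-- def symbols_to_hex(symbols: list[int]) -> str: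
--     """Pack symbols (0/1) MSB-first into hex bytes. Pads trailing bits with 0."""
--     b = ''.join('1' if (s & 1) else '0' for s in symbols)
--     b += '0' * ((-len(b)) % 8)
--     return ''.join(f"{int(b[i:i+8], 2):02x}" for i in range(0, len(b), 8))
-- ===== Notes on version B (the rewrite author's own statement) =====
-- stated objective: alternative
-- what changed: Instead of shift-OR accumulating a byte per 8-symbol chunk of the int list, B first flattens all symbols into a '0'/'1' bit string, right-pads it once to a multiple of 8, and then re-parses each 8-character slice with int(.,2) to format the hex.
import Mathlib
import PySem

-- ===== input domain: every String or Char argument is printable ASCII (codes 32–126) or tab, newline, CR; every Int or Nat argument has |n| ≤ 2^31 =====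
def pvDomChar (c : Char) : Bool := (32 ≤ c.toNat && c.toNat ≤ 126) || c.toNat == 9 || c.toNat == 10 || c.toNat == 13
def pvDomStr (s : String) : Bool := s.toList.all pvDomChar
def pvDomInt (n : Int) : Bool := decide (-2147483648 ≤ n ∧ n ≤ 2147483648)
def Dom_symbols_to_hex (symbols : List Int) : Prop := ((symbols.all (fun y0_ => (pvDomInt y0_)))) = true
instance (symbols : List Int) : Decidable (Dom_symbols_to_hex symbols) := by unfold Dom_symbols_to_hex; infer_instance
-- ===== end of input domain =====

-- B builds one flat '0'/'1' bit string, pads it once to a multiple of 8, and re-parses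
-- 8-character slices, instead of A's per-chunk shift-OR accumulation over the int list.

-- Shared formatting helper: f"{byte:02x}" — exact for 0 ≤ byte ≤ 255, the only values
-- either Python formats (a byte assembled from 8 bits).
def pvHex2 (byte : Int) : String :=
  String.ofList [Nat.digitChar (byte.toNat / 16), Nat.digitChar (byte.toNat % 16)]

-- ===== PORT A =====
-- the for-i-in-range(0,len,8) loop, as recursion peeling 8 symbols per step
def symbolsToHexGo (l : List Int) : String :=
  if _h : l = [] then ""
  else
    let chunk := l.take 8
    let chunk := if chunk.length < 8 then chunk ++ List.replicate (8 - chunk.length) 0 else chunk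
    pvHex2 (chunk.foldl (fun byte s => PySem.Int.bor (byte <<< (1 : Nat)) (PySem.Int.band s 1)) 0)
      ++ symbolsToHexGo (l.drop 8)
termination_by l.length
decreasing_by
  have : l.length ≠ 0 := by simpa using _h
  simp only [List.length_drop]; omega

def symbols_to_hex (symbols : List Int) : String := symbolsToHexGo symbols

-- ===== PORT B =====
def pvBitChar (s : Int) : Char := if PySem.Int.band s 1 ≠ 0 then '1' else '0'

-- hand port of int(str, 2): exact on nonempty strings of '0'/'1' digits, which is all B passes
def pvParseBin2 (cs : List Char) : Int :=
  cs.foldl (fun acc c => acc * 2 + (if c == '1' then 1 else 0)) 0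

-- the ''.join over range(0,len(b),8) of parsed 8-char slices, as recursion on the char list
def altGo (b : List Char) : String :=
  if _h : b = [] then ""
  else pvHex2 (pvParseBin2 (b.take 8)) ++ altGo (b.drop 8)
termination_by b.length
decreasing_by
  have : b.length ≠ 0 := by simpa using _h
  simp only [List.length_drop]; omega

def symbols_to_hex_alt (symbols : List Int) : String :=
  let b := symbols.map pvBitChar
  let b := b ++ List.replicate ((8 - b.length % 8) % 8) '0'   -- '0' * ((-len(b)) % 8)
  altGo b

-- ===== PRECONDITION & SPEC =====
def Spec_symbols_to_hex (symbols : List Int) (out : String) : Prop := out = symbols_to_hex_alt symbols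
instance (symbols : List Int) (out : String) : Decidable (Spec_symbols_to_hex symbols out) := by unfold Spec_symbols_to_hex; infer_instance

-- ===== CLAIM (what is proved, stated in full; the proofs are below) =====
def Claim_equal_symbols_to_hex : Prop := ∀ (symbols : List Int), Dom_symbols_to_hex symbols → Spec_symbols_to_hex symbols (symbols_to_hex symbols)

-- ===== LEMMAS AND PROOFS =====

lemma pv_band01 (s : Int) : PySem.Int.band s 1 = 0 ∨ PySem.Int.band s 1 = 1 := by
  rw [PySem.Int.band_one, PySem.Int.mod_eq_emod_of_pos (by omega : (0:Int) < 2)]; omega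

lemma pv_bitchar_val (s : Int) :
    (if pvBitChar s == '1' then (1 : Int) else 0) = PySem.Int.band s 1 := by
  rcases pv_band01 s with h | h <;> simp [pvBitChar, h]

lemma pv_shift_two (m : Nat) : ((m : Int)) <<< (1 : Nat) = ((2 * m : Nat) : Int) := by
  simp [Int.shiftLeft_eq]; ring

lemma pv_lor_one (m : Nat) : 2 * m ||| 1 = 2 * m + 1 := by
  simpa [Nat.bit] using Nat.lor_bit false m true 0

lemma pv_step (m : Nat) (s : Int) :
    PySem.Int.bor (((m : Int)) <<< (1 : Nat)) (PySem.Int.band s 1)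
      = ((2 * m + (PySem.Int.band s 1).toNat : Nat) : Int) := by
  rw [pv_shift_two]
  rcases pv_band01 s with h | h <;> rw [h]
  · simp
  · rw [show (1 : Int) = ((1 : Nat) : Int) from rfl, PySem.Int.bor_natCast, pv_lor_one]; rfl

lemma pv_foldAB (cs : List Int) : ∀ (m : Nat),
    cs.foldl (fun byte s => PySem.Int.bor (byte <<< (1 : Nat)) (PySem.Int.band s 1)) ((m : Int))
      = (cs.map pvBitChar).foldl (fun acc c => acc * 2 + (if c == '1' then 1 else 0)) ((m : Int)) := by
  induction cs with
  | nil => intro m; rfl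
  | cons s t ih =>
    intro m
    simp only [List.foldl_cons, List.map_cons]
    rw [pv_step]
    have hrhs : ((m : Int)) * 2 + (if pvBitChar s == '1' then (1:Int) else 0)
        = ((2 * m + (PySem.Int.band s 1).toNat : Nat) : Int) := by
      rw [pv_bitchar_val]
      rcases pv_band01 s with h | h <;> rw [h] <;> push_cast <;> ring
    rw [hrhs, ih]

lemma pv_bitchar_zero : pvBitChar 0 = '0' := by decide

lemma pv_goNil : symbolsToHexGo [] = "" := by rw [symbolsToHexGo]; rfl

lemma pv_altGoNil : altGo [] = "" := by rw [altGo]; rfl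

lemma pv_main : ∀ (n : Nat) (l : List Int), l.length ≤ n →
    symbolsToHexGo l
      = altGo (l.map pvBitChar ++ List.replicate ((8 - l.length % 8) % 8) '0') := by
  intro n
  induction n with
  | zero =>
    intro l hl
    have : l = [] := List.eq_nil_of_length_eq_zero (by omega)
    subst this
    simp [pv_goNil, pv_altGoNil]
  | succ n ih =>
    intro l hl
    by_cases hnil : l = []
    · subst hnil; simp [pv_goNil, pv_altGoNil]
    · have hk : 0 < l.length := List.length_pos_of_ne_nil hnil
      rw [symbolsToHexGo, dif_neg hnil]
      by_cases h8 : 8 ≤ l.length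
      · -- full chunk
        have htake : (l.take 8).length = 8 := by simp [List.length_take]; omega
        have hpadeq : (8 - (l.drop 8).length % 8) % 8 = (8 - l.length % 8) % 8 := by
          simp only [List.length_drop]; omega
        have hmapnil : l.map pvBitChar ++ List.replicate ((8 - l.length % 8) % 8) '0' ≠ [] := by
          intro h
          rcases List.append_eq_nil_iff.mp h with ⟨h1, _⟩
          exact hnil (List.map_eq_nil_iff.mp h1)
        rw [altGo, dif_neg hmapnil]
        have htake8 : (l.map pvBitChar ++ List.replicate ((8 - l.length % 8) % 8) '0').take 8
            = (l.take 8).map pvBitChar := by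
          rw [List.take_append_of_le_length (by simp; omega), List.map_take]
        have hdrop8 : (l.map pvBitChar ++ List.replicate ((8 - l.length % 8) % 8) '0').drop 8
            = (l.drop 8).map pvBitChar ++ List.replicate ((8 - (l.drop 8).length % 8) % 8) '0' := by
          rw [List.drop_append_of_le_length (by simp; omega), List.map_drop, hpadeq]
        have hihlen : (l.drop 8).length ≤ n := by simp only [List.length_drop]; omega
        rw [htake8, hdrop8, ← ih (l.drop 8) hihlen]
        simp only [htake, if_neg (by omega : ¬ (8:Nat) < 8)]
        congr 1
        congr 1
        have := pv_foldAB (l.take 8) 0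
        simpa [pvParseBin2] using this
      · -- last partial chunk
        have hlt : l.length < 8 := by omega
        have htakel : l.take 8 = l := List.take_of_length_le (by omega)
        have hdropl : l.drop 8 = [] := List.drop_eq_nil_of_le (by omega)
        have hpad : (8 - l.length % 8) % 8 = 8 - l.length := by omega
        rw [htakel, hdropl, hpad]
        have hL : (l.map pvBitChar ++ List.replicate (8 - l.length) '0').length = 8 := by
          simp [List.length_map]; omega
        have hLnil : l.map pvBitChar ++ List.replicate (8 - l.length) '0' ≠ [] := by
          intro h; rw [h] at hL; simp at hL
        rw [altGo, dif_neg hLnil]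
        rw [List.take_of_length_le (by omega), List.drop_eq_nil_of_le (by omega)]
        rw [pv_goNil, pv_altGoNil]
        simp only [if_pos hlt]
        congr 1
        congr 1
        have hmap : (l ++ List.replicate (8 - l.length) 0).map pvBitChar
            = l.map pvBitChar ++ List.replicate (8 - l.length) '0' := by
          simp [List.map_append, List.map_replicate, pv_bitchar_zero]
        have := pv_foldAB (l ++ List.replicate (8 - l.length) 0) 0
        rw [hmap] at this
        simpa [pvParseBin2] using this

-- ===== VERDICT (by name: the statement is the Claim_ definition above) =====
theorem symbols_to_hex_spec : Claim_equal_symbols_to_hex := by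
  intro symbols _
  show symbols_to_hex symbols = symbols_to_hex_alt symbols
  unfold symbols_to_hex symbols_to_hex_alt
  simp only [List.length_map]
  exact pv_main symbols.length symbols le_rfl
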